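-- pv_equiv track=rewrite | github.com/Gregistrar/codewars | python/6Kyu - Creating a string for an array of objects from a set of words.py | words_to_object
-- ===== SOURCE A (Python) =====
-- def words_to_object(s):
--     if s == '':
--         return '[]'
--     s = s.split()
--     array = []
--     counter = 0
--     while counter < len(s):
--         if len(s) == 2:
--             array.append("[{name : '"+s[counter]+"', id : '"+s[counter+1]+"'}]")
--         elif counter == 0:
--             array.append("[{name : '"+s[counter]+"', id : '"+s[counter+1]+"'}")
--         elif (counter+2) == len(s):
--             array.append("{name : '"+s[counter]+"', id : '"+s[counter+1]+"'}]")
--         else: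
--             array.append("{name : '"+s[counter]+"', id : '"+s[counter+1]+"'}")
--         counter += 2
--     new = ', '.join(array)
--     return new
-- ===== SOURCE B (Python) =====
-- def words_to_object(s):
--     def items(ws):
--         if not ws:
--             return []
--         return ["{name : '" + ws[0] + "', id : '" + ws[1] + "'}"] + items(ws[2:])
--     return '[' + ', '.join(items(s.split())) + ']'
-- ===== Notes on version B (the rewrite author's own statement) =====
-- stated objective: simpler
-- what changed: Replaces the counter-driven while-loop with four position-dependent bracket branches by a structural recursion that peels two words off the list per step into uniform pair items, joins them once, and wraps the result in brackets at the end.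
-- intended difference: On non-empty strings containing only whitespace (split() yields no words) A returns '' while B returns '[]', which is the intended value since A itself returns '[]' for the empty string and the word list is equally empty. — e.g. on words_to_object(" "): A returns "", B returns "[]"
import Mathlib
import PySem

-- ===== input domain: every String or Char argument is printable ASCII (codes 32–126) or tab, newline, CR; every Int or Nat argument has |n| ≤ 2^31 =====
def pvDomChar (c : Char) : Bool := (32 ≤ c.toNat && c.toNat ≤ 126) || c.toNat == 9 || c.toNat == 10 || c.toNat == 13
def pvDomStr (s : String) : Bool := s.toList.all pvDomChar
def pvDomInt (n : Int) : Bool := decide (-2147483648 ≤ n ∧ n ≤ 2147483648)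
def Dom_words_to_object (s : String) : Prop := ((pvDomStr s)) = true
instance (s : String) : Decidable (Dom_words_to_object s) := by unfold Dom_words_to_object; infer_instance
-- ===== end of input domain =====

-- B replaces A's counter-driven while-loop with four position-dependent bracket branches by a
-- structural recursion peeling two words per step into uniform items, joined once and wrapped in
-- '[' ']'; on whitespace-only non-empty input B returns '[]' where A returns '' (D_ below).

-- ===== PORT A =====
-- A's while-loop: counter advances by 2, each step appends one of four bracket-decorated items
-- (fuel = ws.length bounds the iterations; the loop itself stops when counter reaches the length).
def wtoLoopA (ws : List String) (fuel : Nat) (counter : Nat) (array : List String) : List String :=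
  match fuel with
  | 0 => array
  | fuel + 1 =>
    if counter < ws.length then
      wtoLoopA ws fuel (counter + 2) (array ++
        [if ws.length = 2 then
          "[{name : '" ++ (PySem.List.pyGet? ws (counter : Int)).getD "" ++ "', id : '" ++ (PySem.List.pyGet? ws ((counter : Int) + 1)).getD "" ++ "'}]"
        else if counter = 0 then
          "[{name : '" ++ (PySem.List.pyGet? ws (counter : Int)).getD "" ++ "', id : '" ++ (PySem.List.pyGet? ws ((counter : Int) + 1)).getD "" ++ "'}"
        else if counter + 2 = ws.length then
          "{name : '" ++ (PySem.List.pyGet? ws (counter : Int)).getD "" ++ "', id : '" ++ (PySem.List.pyGet? ws ((counter : Int) + 1)).getD "" ++ "'}]"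
        else
          "{name : '" ++ (PySem.List.pyGet? ws (counter : Int)).getD "" ++ "', id : '" ++ (PySem.List.pyGet? ws ((counter : Int) + 1)).getD "" ++ "'}"])
    else array

def words_to_object (s : String) : String :=
  if s = "" then "[]"
  else PySem.Str.join ", " (wtoLoopA (PySem.Str.split₀ s) (PySem.Str.split₀ s).length 0 [])

-- ===== PORT B =====
-- B's recursive helper items(ws): empty list → []; otherwise one uniform item from ws[0], ws[1]
-- consed onto items(ws[2:]).  On a one-element list Python's ws[1] raises IndexError (outside
-- Pre_), which the `| _ => []` arm covers vacuously.
def wtoItems : List String → List String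
  | a :: b :: rest => ("{name : '" ++ a ++ "', id : '" ++ b ++ "'}") :: wtoItems rest
  | _ => []

def words_to_object_alt (s : String) : String :=
  "[" ++ PySem.Str.join ", " (wtoItems (PySem.Str.split₀ s)) ++ "]"

-- ===== PRECONDITION & SPEC =====
-- Pre_ excludes inputs whose whitespace-split yields an odd number of words: there A (and B)
-- raises IndexError on the second word of the last (incomplete) pair.
def Pre_words_to_object (s : String) : Prop := (PySem.Str.split₀ s).length % 2 = 0
instance (s : String) : Decidable (Pre_words_to_object s) := by unfold Pre_words_to_object; infer_instance
def pvWitness_words_to_object : String := "a b"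

-- On non-empty strings containing only whitespace (split() yields no words) A returns '' while B
-- returns '[]', which is the intended value since A itself returns '[]' for the empty string.
def D_words_to_object (s : String) : Prop := s ≠ "" ∧ PySem.Str.split₀ s = []
instance (s : String) : Decidable (D_words_to_object s) := by unfold D_words_to_object; infer_instance

def Spec_words_to_object (s : String) (out : String) : Prop := ¬ D_words_to_object s → out = words_to_object_alt s
instance (s : String) (out : String) : Decidable (Spec_words_to_object s out) := by unfold Spec_words_to_object; infer_instance

def pvDiffWitness_words_to_object : String := " "
def pvDiffWitnessOut_words_to_object : String × String := ("", "[]")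

-- ===== CLAIM (what is proved, stated in full; the proofs are below) =====
def Claim_unchanged_words_to_object : Prop := ∀ (s : String), Dom_words_to_object s → Pre_words_to_object s → Spec_words_to_object s (words_to_object s)
def Claim_changed_words_to_object : Prop := Dom_words_to_object (pvDiffWitness_words_to_object) ∧ Pre_words_to_object (pvDiffWitness_words_to_object) ∧ D_words_to_object (pvDiffWitness_words_to_object) ∧ words_to_object (pvDiffWitness_words_to_object) = pvDiffWitnessOut_words_to_object.1 ∧ words_to_object_alt (pvDiffWitness_words_to_object) = pvDiffWitnessOut_words_to_object.2 ∧ pvDiffWitnessOut_words_to_object.1 ≠ pvDiffWitnessOut_words_to_object.2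
def Claim_exact_words_to_object : Prop := ∀ (s : String), Dom_words_to_object s → Pre_words_to_object s → D_words_to_object s → words_to_object s ≠ words_to_object_alt s

-- ===== LEMMAS AND PROOFS =====

lemma wtoLoopA_acc (ws : List String) :
    ∀ (fuel counter : Nat) (array : List String),
      wtoLoopA ws fuel counter array = array ++ wtoLoopA ws fuel counter [] := by
  intro fuel
  induction fuel with
  | zero => intro counter array; simp [wtoLoopA]
  | succ fuel ih =>
    intro counter array
    by_cases hc : counter < ws.length
    · rw [wtoLoopA, wtoLoopA, if_pos hc, if_pos hc,
        ih (counter + 2), ih (counter + 2) (_ ++ _)]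
      simp
    · rw [wtoLoopA, wtoLoopA, if_neg hc, if_neg hc]
      simp

lemma wtoLoopA_ne_nil (ws : List String) (fuel counter : Nat) (h : counter < ws.length) :
    wtoLoopA ws (fuel + 1) counter [] ≠ [] := by
  rw [wtoLoopA, if_pos h, wtoLoopA_acc ws fuel (counter + 2)]
  simp

lemma str_join_nil : PySem.Str.join ", " ([] : List String) = "" := by decide

lemma str_join_singleton (a : String) : PySem.Str.join ", " [a] = a := by
  rw [← String.toList_inj]
  simp [PySem.Str.toList_join, PySem.Chars.join_singleton]

lemma str_join_cons_cons (a b : String) (l : List String) :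
    PySem.Str.join ", " (a :: b :: l) = a ++ ", " ++ PySem.Str.join ", " (b :: l) := by
  rw [← String.toList_inj]
  simp [PySem.Str.toList_join, PySem.Chars.join_cons_cons]

-- shape of ws.drop counter when two more words exist, phrased with A's pyGet? values
lemma wtoItems_nil : wtoItems [] = [] := rfl

lemma wtoItems_drop (ws : List String) (counter : Nat) (h : counter + 1 < ws.length) :
    wtoItems (ws.drop counter) =
      ("{name : '" ++ (PySem.List.pyGet? ws (counter : Int)).getD "" ++ "', id : '" ++
        (PySem.List.pyGet? ws ((counter : Int) + 1)).getD "" ++ "'}") :: wtoItems (ws.drop (counter + 2)) := by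
  have h0 : counter < ws.length := by omega
  rw [List.drop_eq_getElem_cons h0, List.drop_eq_getElem_cons (by omega : counter + 1 < ws.length)]
  have e1 : PySem.List.pyGet? ws (counter : Int) = some ws[counter] := by
    simp [PySem.List.pyGet?_natCast, List.getElem?_eq_getElem h0]
  have e2 : PySem.List.pyGet? ws ((counter : Int) + 1) = some ws[counter + 1] := by
    have hcast : ((counter : Int) + 1) = ((counter + 1 : Nat) : Int) := by push_cast; ring
    rw [hcast, PySem.List.pyGet?_natCast, List.getElem?_eq_getElem h]
  rw [wtoItems, e1, e2]
  simp

-- join of A's loop from an interior even position = join of B's items on the rest, plus ']'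
lemma wtoLoopA_tail (ws : List String) :
    ∀ (fuel counter : Nat), ws.length - counter ≤ fuel → 2 ≤ counter → counter % 2 = 0 →
      ws.length % 2 = 0 → counter < ws.length →
      PySem.Str.join ", " (wtoLoopA ws fuel counter []) =
        PySem.Str.join ", " (wtoItems (ws.drop counter)) ++ "]" := by
  intro fuel
  induction fuel with
  | zero => intro counter h _ _ _ hc; omega
  | succ fuel ih =>
    intro counter h h2 hce hne hc
    have hn2 : ws.length ≠ 2 := by omega
    have hc0 : counter ≠ 0 := by omega
    have hpair : counter + 1 < ws.length := by omega
    rw [wtoLoopA, if_pos hc]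
    simp only [if_neg hn2, if_neg hc0, List.nil_append]
    by_cases hlast : counter + 2 = ws.length
    · rw [if_pos hlast, wtoLoopA_acc ws fuel (counter + 2)]
      have hstop : ¬ counter + 2 < ws.length := by omega
      have hend : wtoLoopA ws fuel (counter + 2) [] = [] := by
        cases fuel with
        | zero => rw [wtoLoopA]
        | succ fuel => rw [wtoLoopA, if_neg hstop]
      rw [hend, List.append_nil, str_join_singleton]
      rw [wtoItems_drop ws counter hpair]
      have hdrop : ws.drop (counter + 2) = [] := by
        rw [List.drop_eq_nil_iff]; omega
      rw [hdrop, wtoItems_nil, str_join_singleton]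
      have hb : ("'}]" : String) = "'}" ++ "]" := by decide
      rw [hb]
      simp [String.append_assoc]
    · rw [if_neg hlast, wtoLoopA_acc ws fuel (counter + 2)]
      have hlt : counter + 2 < ws.length := by omega
      obtain ⟨fuel', rfl⟩ : ∃ f, fuel = f + 1 := ⟨fuel - 1, by omega⟩
      obtain ⟨r, rs, hrest⟩ :=
        List.exists_cons_of_ne_nil (wtoLoopA_ne_nil ws fuel' (counter + 2) hlt)
      have htail := ih (counter + 2) (by omega) (by omega) (by omega) hne hlt
      rw [hrest] at htail ⊢
      rw [List.singleton_append, str_join_cons_cons]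
      rw [wtoItems_drop ws counter hpair]
      have hitems : wtoItems (ws.drop (counter + 2)) ≠ [] := by
        rw [wtoItems_drop ws (counter + 2) (by omega)]; simp
      obtain ⟨q, qs, hq⟩ := List.exists_cons_of_ne_nil hitems
      rw [hq] at htail ⊢
      rw [str_join_cons_cons, htail]
      simp [String.append_assoc]

-- the whole loop from counter = 0, for a non-empty even word list
lemma wtoLoopA_main (ws : List String) (hne : ws ≠ []) (hev : ws.length % 2 = 0) :
    PySem.Str.join ", " (wtoLoopA ws ws.length 0 []) =
      "[" ++ PySem.Str.join ", " (wtoItems ws) ++ "]" := by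
  have hpos : 0 < ws.length := List.length_pos_of_ne_nil hne
  have h2 : 2 ≤ ws.length := by omega
  obtain ⟨f, hf⟩ : ∃ f, ws.length = f + 1 := ⟨ws.length - 1, by omega⟩
  conv_lhs => rw [hf]
  rw [wtoLoopA, if_pos (by omega : 0 < ws.length)]
  simp only [List.nil_append]
  have hhead : ("[{name : '" : String) = "[" ++ "{name : '" := by decide
  have hws : ws = ws.drop 0 := rfl
  by_cases hn2 : ws.length = 2
  · rw [if_pos hn2, wtoLoopA_acc ws f 2]
    have hend : wtoLoopA ws f 2 [] = [] := by
      cases f with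
      | zero => rw [wtoLoopA]
      | succ f => rw [wtoLoopA, if_neg (by omega : ¬ 2 < ws.length)]
    rw [hend, List.append_nil, str_join_singleton]
    conv_rhs => rw [hws]
    rw [wtoItems_drop ws 0 (by omega)]
    have hdrop : ws.drop (0 + 2) = [] := by rw [List.drop_eq_nil_iff]; omega
    rw [hdrop, wtoItems_nil, str_join_singleton]
    have hb : ("'}]" : String) = "'}" ++ "]" := by decide
    rw [hb]
    simp [String.append_assoc]
    rw [hhead, String.append_assoc]
  · rw [if_neg hn2]
    simp only [if_true]
    rw [wtoLoopA_acc ws f 2]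
    have hlt : 2 < ws.length := by omega
    obtain ⟨f', rfl⟩ : ∃ g, f = g + 1 := ⟨f - 1, by omega⟩
    obtain ⟨r, rs, hrest⟩ := List.exists_cons_of_ne_nil (wtoLoopA_ne_nil ws f' 2 hlt)
    have htail := wtoLoopA_tail ws (f' + 1) 2 (by omega) (by omega) (by omega) hev hlt
    rw [hrest] at htail ⊢
    rw [List.singleton_append, str_join_cons_cons, htail]
    conv_rhs => rw [hws]
    rw [wtoItems_drop ws 0 (by omega)]
    have hitems : wtoItems (ws.drop (0 + 2)) ≠ [] := by
      rw [wtoItems_drop ws 2 (by omega)]; simp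
    obtain ⟨q, qs, hq⟩ := List.exists_cons_of_ne_nil hitems
    have h02 : (0 : Nat) + 2 = 2 := rfl
    rw [h02] at hq
    rw [hq] at htail ⊢
    rw [str_join_cons_cons]
    simp [String.append_assoc]
    rw [hhead, String.append_assoc]

-- ===== VERDICT (by name: the statement is the Claim_ definition above) =====
theorem words_to_object_spec : Claim_unchanged_words_to_object := by
  intro s _ hpre hnd
  by_cases hs : s = ""
  · subst hs; decide
  · have hsplit : PySem.Str.split₀ s ≠ [] := fun hnil => hnd ⟨hs, hnil⟩
    rw [words_to_object, if_neg hs, words_to_object_alt]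
    exact wtoLoopA_main (PySem.Str.split₀ s) hsplit hpre

theorem words_to_object_changed : Claim_changed_words_to_object := by
  unfold Claim_changed_words_to_object
  decide

theorem words_to_object_tight : Claim_exact_words_to_object := by
  intro s _ _ hd
  obtain ⟨hne, hsplit⟩ := hd
  rw [words_to_object, if_neg hne, hsplit, words_to_object_alt, hsplit]
  simp [wtoLoopA, wtoItems, str_join_nil]
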